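-- pv_equiv track=rewrite | github.com/enjoy-digital/litepcie | litepcie/common.py | get_bar_mask
-- ===== SOURCE A (Python) =====
-- def get_bar_mask(size):
--     mask = 0
--     found = 0
--     for i in range(32):
--         if size%2:
--             found = 1
--         if found:
--             mask |= (1 << i)
--         size = size >> 1
--     return mask
-- ===== SOURCE B (Python) =====
-- def get_bar_mask(size):
--     low = size % 0x100000000
--     if low == 0:
--         return 0
--     lsb = low - (low & (low - 1))  # isolate lowest set bit
--     return 0x100000000 - lsb
-- ===== Notes on version B (the rewrite author's own statement) =====
-- stated objective: idiomatic
-- what changed: Replaces the per-bit running-flag scan loop over all thirty-two bit positions with a closed-form computation: reduce the input to its low word, isolate the lowest set bit via the and-with-predecessor trick, and subtract that bit from the modulus.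
import Mathlib
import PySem

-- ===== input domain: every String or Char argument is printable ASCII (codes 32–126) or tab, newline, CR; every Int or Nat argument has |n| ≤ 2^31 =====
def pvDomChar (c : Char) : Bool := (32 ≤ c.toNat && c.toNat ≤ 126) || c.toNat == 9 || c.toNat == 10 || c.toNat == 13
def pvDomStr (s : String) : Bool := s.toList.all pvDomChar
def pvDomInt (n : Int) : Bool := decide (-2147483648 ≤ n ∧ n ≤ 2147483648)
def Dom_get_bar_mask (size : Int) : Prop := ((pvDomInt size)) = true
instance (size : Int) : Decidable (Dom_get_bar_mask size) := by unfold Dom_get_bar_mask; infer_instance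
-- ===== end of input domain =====

-- B replaces A's 32-iteration running-flag bit scan by a closed-form computation
-- (reduce mod 2^32, isolate the lowest set bit with low & (low - 1)); same value on every Int.

-- ===== PORT A =====
-- loop body of A: state (mask, found, size); `1 << i` is ported with i.toNat (exact: i ranges over 0..31)
def pvStepA (st : Int × Int × Int) (i : Int) : Int × Int × Int :=
  let found := if PySem.Int.mod st.2.2 2 ≠ 0 then 1 else st.2.1
  let mask := if found ≠ 0 then PySem.Int.bor st.1 ((1 : Int) <<< i.toNat) else st.1
  (mask, found, st.2.2 >>> (1 : Nat))

def get_bar_mask (size : Int) : Int :=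
  ((PySem.List.pyRange 0 32 1).foldl pvStepA (0, 0, size)).1

-- ===== PORT B =====
def get_bar_mask_alt (size : Int) : Int :=
  let low := PySem.Int.mod size 4294967296
  if low = 0 then 0
  else
    let lsb := low - PySem.Int.band low (low - 1)
    4294967296 - lsb

-- ===== PRECONDITION & SPEC =====
def Spec_get_bar_mask (size : Int) (out : Int) : Prop := out = get_bar_mask_alt size
instance (size : Int) (out : Int) : Decidable (Spec_get_bar_mask size out) := by unfold Spec_get_bar_mask; infer_instance

-- ===== CLAIM (what is proved, stated in full; the proofs are below) =====
def Claim_equal_get_bar_mask : Prop := ∀ (size : Int), Dom_get_bar_mask size → Spec_get_bar_mask size (get_bar_mask size)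

-- ===== LEMMAS AND PROOFS =====

-- Python's `n >> 1` on Int is floor division by 2
theorem pv_shiftRight_one (s : Int) : s >>> (1 : Nat) = s / 2 := by
  cases s with
  | ofNat m =>
      show Int.ofNat (m >>> 1) = Int.ofNat m / 2
      simp [Nat.shiftRight_succ]
  | negSucc m =>
      show Int.negSucc (m >>> 1) = Int.negSucc m / 2
      simp [Nat.shiftRight_succ]
      omega

theorem pv_shl_one (n : Nat) : (1 : Int) <<< n = ((2 ^ n : Nat) : Int) := by
  simp [Int.shiftLeft_eq]

theorem pv_lor_pow_of_lt (a i : Nat) (h : a < 2 ^ i) : a ||| 2 ^ i = a + 2 ^ i := by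
  have := Nat.two_pow_add_eq_or_of_lt h 1
  simp [Nat.lor_comm] at this
  omega

-- spec of A's loop once `found` is still 0: scan bits low-to-high
def pvScan : Nat → Int → Nat → Int
  | 0, _, _ => 0
  | k+1, s, i =>
      if PySem.Int.mod s 2 ≠ 0 then ((2 ^ 32 - 2 ^ i : Nat) : Int)
      else pvScan k (s >>> (1 : Nat)) (i + 1)

def pvNScan : Nat → Nat → Nat → Int
  | 0, _, _ => 0
  | k+1, n, i =>
      if n % 2 = 1 then ((2 ^ 32 - 2 ^ i : Nat) : Int)
      else pvNScan k (n / 2) (i + 1)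

theorem pvScan_succ (k : Nat) (s : Int) (i : Nat) :
    pvScan (k+1) s i = if PySem.Int.mod s 2 ≠ 0 then ((2 ^ 32 - 2 ^ i : Nat) : Int)
      else pvScan k (s >>> (1 : Nat)) (i + 1) := rfl

theorem pvNScan_succ (k n i : Nat) :
    pvNScan (k+1) n i = if n % 2 = 1 then ((2 ^ 32 - 2 ^ i : Nat) : Int)
      else pvNScan k (n / 2) (i + 1) := rfl

-- the run of A's loop after `found` was set at bit v
theorem pv_run1 : ∀ (k v : Nat), k ≤ 32 → v ≤ 32 - k → ∀ s : Int,
    ((PySem.List.pyRange ((32 - k : Nat) : Int) 32 1).foldl pvStepA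
      (((2 ^ (32 - k) - 2 ^ v : Nat) : Int), 1, s)).1 = ((2 ^ 32 - 2 ^ v : Nat) : Int) := by
  intro k
  induction k with
  | zero =>
      intro v _ _ s
      rw [PySem.List.pyRange_one_eq_nil (by norm_num)]
      rfl
  | succ k ih =>
      intro v hk hv s
      have hi : 32 - (k + 1) = 31 - k := by omega
      have hcons : PySem.List.pyRange ((32 - (k+1) : Nat) : Int) 32 1
          = ((31 - k : Nat) : Int) :: PySem.List.pyRange (((31 - k : Nat) : Int) + 1) 32 1 := by
        rw [hi]; exact PySem.List.pyRange_one_cons (by omega)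
      rw [hcons, List.foldl_cons]
      have hstep : pvStepA (((2 ^ (32 - (k+1)) - 2 ^ v : Nat) : Int), 1, s) (((31 - k : Nat) : Int))
          = (((2 ^ (32 - k) - 2 ^ v : Nat) : Int), 1, s >>> (1 : Nat)) := by
        unfold pvStepA
        have hfound : (if PySem.Int.mod s 2 ≠ 0 then (1 : Int) else 1) = 1 := by split <;> rfl
        simp only [hfound]
        simp only [if_pos (by norm_num : (1 : Int) ≠ 0)]
        have ht : (((31 - k : Nat) : Int)).toNat = 31 - k := Int.toNat_natCast _
        rw [ht, pv_shl_one, hi, PySem.Int.bor_natCast]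
        have hvle : 2 ^ v ≤ 2 ^ (31 - k) := Nat.pow_le_pow_right (by norm_num) (by omega)
        have hpos : 0 < 2 ^ v := Nat.two_pow_pos v
        have hlt : 2 ^ (31 - k) - 2 ^ v < 2 ^ (31 - k) := by omega
        rw [pv_lor_pow_of_lt _ _ hlt]
        have h2 : (2:Nat) ^ (32 - k) = 2 ^ (31 - k) + 2 ^ (31 - k) := by
          have : 32 - k = (31 - k) + 1 := by omega
          rw [this, pow_succ]; omega
        congr 2
        omega
      rw [hstep]
      have hib : ((31 - k : Nat) : Int) + 1 = ((32 - k : Nat) : Int) := by omega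
      rw [hib]
      exact ih v (by omega) (by omega) (s >>> (1 : Nat))

-- the run of A's loop while `found` is still 0 computes pvScan
theorem pv_run0 : ∀ (k : Nat), k ≤ 32 → ∀ s : Int,
    ((PySem.List.pyRange ((32 - k : Nat) : Int) 32 1).foldl pvStepA (0, 0, s)).1
      = pvScan k s (32 - k) := by
  intro k
  induction k with
  | zero =>
      intro _ s
      rw [PySem.List.pyRange_one_eq_nil (by norm_num)]
      rfl
  | succ k ih =>
      intro hk s
      have hi : 32 - (k + 1) = 31 - k := by omega
      have hcons : PySem.List.pyRange ((32 - (k+1) : Nat) : Int) 32 1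
          = ((31 - k : Nat) : Int) :: PySem.List.pyRange (((31 - k : Nat) : Int) + 1) 32 1 := by
        rw [hi]; exact PySem.List.pyRange_one_cons (by omega)
      rw [hcons, List.foldl_cons]
      by_cases h : PySem.Int.mod s 2 ≠ 0
      · have hstep : pvStepA ((0 : Int), 0, s) (((31 - k : Nat) : Int))
            = (((2 ^ (32 - k) - 2 ^ (31 - k) : Nat) : Int), 1, s >>> (1 : Nat)) := by
          unfold pvStepA
          simp only [if_pos h, if_pos (by norm_num : (1 : Int) ≠ 0)]
          have ht : (((31 - k : Nat) : Int)).toNat = 31 - k := Int.toNat_natCast _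
          rw [ht, pv_shl_one]
          have : PySem.Int.bor 0 ((2 ^ (31 - k) : Nat) : Int) = ((2 ^ (31 - k) : Nat) : Int) := by
            have := PySem.Int.bor_natCast 0 (2 ^ (31 - k))
            simpa using this
          rw [this]
          have h2 : (2:Nat) ^ (32 - k) = 2 ^ (31 - k) + 2 ^ (31 - k) := by
            have : 32 - k = (31 - k) + 1 := by omega
            rw [this, pow_succ]; omega
          have h3 : (2:Nat) ^ (32 - k) - 2 ^ (31 - k) = 2 ^ (31 - k) := by rw [h2, Nat.add_sub_cancel]
          rw [h3]
        rw [hstep]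
        have hib : ((31 - k : Nat) : Int) + 1 = ((32 - k : Nat) : Int) := by omega
        rw [hib, pv_run1 k (31 - k) (by omega) (by omega) (s >>> (1 : Nat))]
        show _ = pvScan (k+1) s (32 - (k+1))
        rw [pvScan_succ, if_pos h, hi]
      · have hstep : pvStepA ((0 : Int), 0, s) (((31 - k : Nat) : Int))
            = ((0 : Int), 0, s >>> (1 : Nat)) := by
          unfold pvStepA
          simp only [if_neg h]
          simp
        rw [hstep]
        have hib : ((31 - k : Nat) : Int) + 1 = ((32 - k : Nat) : Int) := by omega
        rw [hib, ih (by omega) (s >>> (1 : Nat))]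
        show _ = pvScan (k+1) s (32 - (k+1))
        rw [pvScan_succ, if_neg h, show 32 - (k+1) + 1 = 32 - k from by omega]

-- pvScan only depends on s modulo 2^k
theorem pv_scan_congr : ∀ (k : Nat) (s : Int) (n : Nat) (i : Nat),
    ((2 ^ k : Int) ∣ (s - (n : Int))) → pvScan k s i = pvNScan k n i := by
  intro k
  induction k with
  | zero => intro s n i _; rfl
  | succ k ih =>
      intro s n i hdvd
      obtain ⟨t, ht⟩ := hdvd
      have hs : s = (n : Int) + 2 * (2 ^ k * t) := by
        have : (2 : Int) ^ (k + 1) = 2 ^ k * 2 := pow_succ 2 k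
        rw [this] at ht
        linarith [ht]
      have hmod2 : PySem.Int.mod s 2 = ((n % 2 : Nat) : Int) := by
        rw [PySem.Int.mod_eq_emod_of_pos (by norm_num)]
        rw [hs, Int.add_mul_emod_self_left]
        push_cast
        omega
      rw [pvScan_succ, pvNScan_succ]
      by_cases hp : n % 2 = 1
      · rw [if_pos (by rw [hmod2, hp]; norm_num), if_pos hp]
      · have hne : n % 2 = 0 := by omega
        rw [if_neg (by rw [hmod2, hne]; simp), if_neg hp]
        apply ih
        rw [pv_shiftRight_one]
        have hneven : n = 2 * (n / 2) := by omega
        have hdiv : s / 2 = ((n / 2 : Nat) : Int) + 2 ^ k * t := by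
          rw [hs]
          conv_lhs => rw [hneven]
          push_cast
          omega
        rw [hdiv]
        exact ⟨t, by ring⟩

theorem pv_nscan_zero : ∀ (k i : Nat), pvNScan k 0 i = 0 := by
  intro k
  induction k with
  | zero => intro i; rfl
  | succ k ih => intro i; rw [pvNScan_succ, if_neg (by omega)]; exact ih (i + 1)

-- for odd n, n & (n-1) clears the low bit
theorem pv_land_pred_odd (n : Nat) (h : n % 2 = 1) : n &&& (n - 1) = n - 1 := by
  apply Nat.eq_of_testBit_eq
  intro j
  rw [Nat.testBit_land]
  cases j with
  | zero =>
      simp only [Nat.testBit_zero]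
      have h1 : (n - 1) % 2 = 0 := by omega
      simp [h, h1]
  | succ j =>
      rw [Nat.testBit_add_one, Nat.testBit_add_one]
      have : (n - 1) / 2 = n / 2 := by omega
      rw [this, Bool.and_self]

-- for even n, n & (n-1) halves
theorem pv_land_pred_even (n : Nat) (h : n % 2 = 0) (hp : 0 < n) :
    n &&& (n - 1) = 2 * ((n / 2) &&& (n / 2 - 1)) := by
  apply Nat.eq_of_testBit_eq
  intro j
  rw [Nat.testBit_land]
  cases j with
  | zero =>
      simp only [Nat.testBit_zero]
      have h2 : (2 * ((n / 2) &&& (n / 2 - 1))) % 2 = 0 := Nat.mul_mod_right 2 _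
      simp [h, h2]
  | succ j =>
      rw [Nat.testBit_add_one, Nat.testBit_add_one, Nat.testBit_add_one]
      have e1 : (n - 1) / 2 = n / 2 - 1 := by omega
      have e2 : (2 * ((n / 2) &&& (n / 2 - 1))) / 2 = (n / 2) &&& (n / 2 - 1) := by omega
      rw [e1, e2, Nat.testBit_land]

theorem pv_nscan_pos : ∀ (k : Nat), ∀ (n i : Nat), 0 < n → n < 2 ^ k → i + k ≤ 32 →
    pvNScan k n i = ((2 ^ 32 - 2 ^ i * (n - (n &&& (n - 1))) : Nat) : Int) := by
  intro k
  induction k with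
  | zero => intro n i h1 h2 _; omega
  | succ k ih =>
      intro n i h1 h2 h3
      rw [pvNScan_succ]
      by_cases hp : n % 2 = 1
      · rw [if_pos hp, pv_land_pred_odd n hp]
        congr 1
        have : n - (n - 1) = 1 := by omega
        rw [this]
        omega
      · have hne : n % 2 = 0 := by omega
        rw [if_neg hp]
        have hpow : 2 ^ (k + 1) = 2 * 2 ^ k := by rw [pow_succ]; omega
        rw [ih (n / 2) (i + 1) (by omega) (by omega) (by omega)]
        rw [pv_land_pred_even n hne h1]
        congr 1
        have hps : 2 ^ (i + 1) = 2 * 2 ^ i := by rw [pow_succ]; omega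
        have hble : (n / 2) &&& (n / 2 - 1) ≤ n / 2 - 1 := Nat.and_le_right
        have h4 : n - 2 * ((n / 2) &&& (n / 2 - 1)) = 2 * (n / 2 - ((n / 2) &&& (n / 2 - 1))) := by omega
        rw [h4, hps]
        congr 1
        ring

-- A's port equals the scan spec
theorem pv_A_eq_scan (s : Int) : get_bar_mask s = pvScan 32 s 0 := by
  have := pv_run0 32 (by omega) s
  simpa [get_bar_mask] using this

theorem pv_main (s : Int) : get_bar_mask s = get_bar_mask_alt s := by
  have hmposN : (0 : Int) < 4294967296 := by norm_num
  have hm : (0 : Int) ≤ s % 4294967296 := Int.emod_nonneg s (by norm_num)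
  have hlt : s % 4294967296 < 4294967296 := Int.emod_lt_of_pos s hmposN
  set n : Nat := (s % 4294967296).toNat with hn
  have hcast : ((n : Nat) : Int) = s % 4294967296 := Int.toNat_of_nonneg hm
  have hdvd : ((2 ^ 32 : Int)) ∣ (s - (n : Int)) := by
    refine ⟨s / 4294967296, ?_⟩
    rw [hcast]
    have := Int.mul_ediv_add_emod s 4294967296
    norm_num
    linarith [this]
  have hA : get_bar_mask s = pvNScan 32 n 0 := by
    rw [pv_A_eq_scan, pv_scan_congr 32 s n 0 hdvd]
  have hmodeq : PySem.Int.mod s 4294967296 = ((n : Nat) : Int) := by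
    rw [PySem.Int.mod_eq_emod_of_pos hmposN, hcast]
  by_cases hz : n = 0
  · rw [hA, hz, pv_nscan_zero]
    unfold get_bar_mask_alt
    rw [hmodeq, hz]
    norm_num
  · have hpos : 0 < n := by omega
    have hnlt : n < 2 ^ 32 := by
      have : ((n : Nat) : Int) < 4294967296 := by rw [hcast]; exact hlt
      norm_num at this
      omega
    rw [hA, pv_nscan_pos 32 n 0 hpos hnlt (by omega)]
    unfold get_bar_mask_alt
    rw [hmodeq]
    rw [if_neg (by exact_mod_cast hz)]
    have hsub : ((n : Nat) : Int) - 1 = (((n - 1 : Nat)) : Int) := by omega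
    rw [hsub, PySem.Int.band_natCast]
    have hble : n &&& (n - 1) ≤ n - 1 := Nat.and_le_right
    push_cast
    omega

-- ===== VERDICT (by name: the statement is the Claim_ definition above) =====
theorem get_bar_mask_spec : Claim_equal_get_bar_mask := by
  intro size _
  unfold Spec_get_bar_mask
  exact pv_main size
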